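-- pv_equiv track=rewrite | github.com/gallorob/llmaker | llm_backend.py | filter_schema
-- ===== SOURCE A (Python) =====
-- from typing import Any, Dict, List
--
-- def filter_schema(schema: List[Dict[str, Any]], to_remove: List[str]) -> List[Dict[str, Any]]:
-- 	for k in to_remove:
-- 		funcs_to_omit = []
-- 		for i, func in enumerate(schema):
-- 			if func['function']['name'].startswith(k):
-- 				funcs_to_omit.append(i)
-- 		for idx in reversed(funcs_to_omit):
-- 			schema.pop(idx)
-- 	return schema
-- ===== SOURCE B (Python) =====
-- from typing import Any, Dict, List
--
-- def filter_schema(schema: List[Dict[str, Any]], to_remove: List[str]) -> List[Dict[str, Any]]: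
-- 	# Single filtering pass; slice-assignment keeps the in-place mutation A's callers see.
-- 	if to_remove:
-- 		schema[:] = [func for func in schema
-- 		             if not any(func['function']['name'].startswith(k) for k in to_remove)]
-- 	return schema
-- ===== Notes on version B (the rewrite author's own statement) =====
-- stated objective: simpler
-- what changed: One list-comprehension pass keeping survivors of all prefixes at once (written back with slice assignment) replaces A's per-prefix index-collection pass followed by reversed pop() calls.
import Mathlib
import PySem

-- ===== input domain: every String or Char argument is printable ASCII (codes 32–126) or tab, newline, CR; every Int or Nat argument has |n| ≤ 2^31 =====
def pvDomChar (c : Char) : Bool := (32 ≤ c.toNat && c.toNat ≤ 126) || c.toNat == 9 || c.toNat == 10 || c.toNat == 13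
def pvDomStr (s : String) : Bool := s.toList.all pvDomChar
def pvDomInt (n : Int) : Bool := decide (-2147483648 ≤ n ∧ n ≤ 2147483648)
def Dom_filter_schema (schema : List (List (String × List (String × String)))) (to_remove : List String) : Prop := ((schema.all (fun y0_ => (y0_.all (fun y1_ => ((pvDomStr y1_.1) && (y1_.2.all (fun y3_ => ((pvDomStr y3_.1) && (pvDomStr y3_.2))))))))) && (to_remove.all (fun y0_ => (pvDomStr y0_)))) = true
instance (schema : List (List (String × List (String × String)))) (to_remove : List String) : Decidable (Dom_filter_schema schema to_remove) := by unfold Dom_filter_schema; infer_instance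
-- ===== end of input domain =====

-- B replaces A's per-prefix index-collect + reversed-pop passes by one filtering pass over the
-- schema (simpler); both Pythons mutate `schema` in place and return it — the theorem is about the
-- returned value, and B performs the same caller-visible mutation via slice assignment.


-- shared dict-access helper: Python d[k] on an association list (first match); none = KeyError
def pvLookup? {ν : Type} (d : List (String × ν)) (k : String) : Option ν :=
  match d with
  | [] => none
  | (a, v) :: rest => if a == k then some v else pvLookup? rest k

-- func['function']['name']; the "" default is never observed inside Pre_ (keys present there)
def pvName (func : List (String × List (String × String))) : String :=
  match pvLookup? func "function" with
  | some d => (pvLookup? d "name").getD ""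
  | none => ""

-- ===== PORT A =====
def filter_schema (schema : List (List (String × List (String × String)))) (to_remove : List String) : List (List (String × List (String × String))) :=
  to_remove.foldl (fun s k =>
    let funcs_to_omit : List Int :=
      (PySem.List.enumerate s).foldl
        (fun acc p => if PySem.Str.startswith (pvName p.2) k then acc ++ [p.1] else acc) []
    -- schema.pop(idx): indices come from enumerate in increasing order and are popped back to
    -- front, so every pop? is in range and Python never raises here; `none => s2` is unreachable
    funcs_to_omit.reverse.foldl
      (fun s2 idx =>
        match PySem.List.pop? s2 idx with
        | some r => r.2
        | none => s2) s) schema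

-- ===== PORT B =====
def filter_schema_alt (schema : List (List (String × List (String × String)))) (to_remove : List String) : List (List (String × List (String × String))) :=
  if to_remove.isEmpty then schema
  else schema.filter (fun func => !(to_remove.any (fun k => PySem.Str.startswith (pvName func) k)))

-- ===== PRECONDITION & SPEC =====
-- Pre_ excludes exactly the inputs where Python A raises KeyError: to_remove nonempty and some
-- schema entry lacks the 'function' key or its value lacks the 'name' key.
def Pre_filter_schema (schema : List (List (String × List (String × String)))) (to_remove : List String) : Prop :=
  to_remove = [] ∨ ∀ f ∈ schema, ((f.lookup "function").bind (fun d => d.lookup "name")).isSome = true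
instance (schema : List (List (String × List (String × String)))) (to_remove : List String) : Decidable (Pre_filter_schema schema to_remove) := by unfold Pre_filter_schema; infer_instance

def pvWitness_filter_schema : (List (List (String × List (String × String)))) × List String :=
  ([[("function", [("name", "get_weather")])], [("function", [("name", "set_x")])]], ["set_"])

def Spec_filter_schema (schema : List (List (String × List (String × String)))) (to_remove : List String) (out : List (List (String × List (String × String)))) : Prop := out = filter_schema_alt schema to_remove
instance (schema : List (List (String × List (String × String)))) (to_remove : List String) (out : List (List (String × List (String × String)))) : Decidable (Spec_filter_schema schema to_remove out) := by unfold Spec_filter_schema; infer_instance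

-- ===== CLAIM (what is proved, stated in full; the proofs are below) =====
def Claim_equal_filter_schema : Prop := ∀ (schema : List (List (String × List (String × String)))) (to_remove : List String), Dom_filter_schema schema to_remove → Pre_filter_schema schema to_remove → Spec_filter_schema schema to_remove (filter_schema schema to_remove)

-- ===== LEMMAS AND PROOFS =====

-- q abbreviates the per-prefix match test
-- omitF q s0 xs: the indices (counting from s0) of the entries of xs matching q
def omitF {α : Type} (q : α → Bool) (s0 : Int) : List α → List Int
  | [] => []
  | x :: xs => (if q x then [s0] else []) ++ omitF q (s0 + 1) xs

def popStep {α : Type} (s2 : List α) (idx : Int) : List α :=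
  match PySem.List.pop? s2 idx with
  | some r => r.2
  | none => s2

lemma omitF_foldl {α : Type} (q : α → Bool) (xs : List α) (s0 : Int) (acc : List Int) :
    (PySem.List.enumerate xs s0).foldl
      (fun acc p => if q p.2 then acc ++ [p.1] else acc) acc = acc ++ omitF q s0 xs := by
  induction xs generalizing s0 acc with
  | nil => simp [PySem.List.enumerate_nil, omitF]
  | cons x xs ih =>
    simp only [PySem.List.enumerate_cons, List.foldl_cons, omitF]
    rw [ih]
    by_cases h : q x <;> simp [h]

lemma omitF_shift {α : Type} (q : α → Bool) (xs : List α) (s0 : Int) :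
    omitF q (s0 + 1) xs = (omitF q s0 xs).map (· + 1) := by
  induction xs generalizing s0 with
  | nil => simp [omitF]
  | cons x xs ih => by_cases h : q x <;> simp [omitF, h, ih]

lemma omitF_bounds {α : Type} (q : α → Bool) (xs : List α) (s0 : Int) :
    ∀ i ∈ omitF q s0 xs, s0 ≤ i ∧ i < s0 + xs.length := by
  induction xs generalizing s0 with
  | nil => simp [omitF]
  | cons x xs ih =>
    intro i hi
    simp only [omitF, List.mem_append] at hi
    rcases hi with hi | hi
    · by_cases h : q x
      · simp [h] at hi
        subst hi
        simp only [List.length_cons]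
        push_cast
        omega
      · simp [h] at hi
    · have := ih (s0 + 1) i hi
      simp only [List.length_cons]
      push_cast
      omega

lemma omitF_pairwise {α : Type} (q : α → Bool) (xs : List α) (s0 : Int) :
    (omitF q s0 xs).Pairwise (· < ·) := by
  induction xs generalizing s0 with
  | nil => simp [omitF]
  | cons x xs ih =>
    simp only [omitF]
    refine List.pairwise_append.2 ⟨?_, ih (s0 + 1), ?_⟩
    · by_cases h : q x <;> simp [h]
    · intro a ha b hb
      by_cases h : q x
      · simp [h] at ha
        subst ha
        have := omitF_bounds q xs _ b hb
        omega
      · simp [h] at ha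

-- popping at (+1)-shifted, in-range, strictly decreasing indices on (x :: xs) keeps x, acts on xs
lemma popStep_shift {α : Type} (x : α) (xs : List α) (R : List Int)
    (hpw : R.Pairwise (· > ·)) (hb : ∀ i ∈ R, 0 ≤ i ∧ i < xs.length) :
    (R.map (· + 1)).foldl popStep (x :: xs) = x :: R.foldl popStep xs := by
  induction R generalizing xs with
  | nil => simp
  | cons i R ih =>
    simp only [List.map_cons, List.foldl_cons]
    obtain ⟨h0, hlt⟩ := hb i (by simp)
    obtain ⟨n, rfl⟩ : ∃ n : Nat, i = (n : Int) := ⟨i.toNat, (Int.toNat_of_nonneg h0).symm⟩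
    have hn : n < xs.length := by exact_mod_cast hlt
    have h1 : popStep xs (n : Int) = xs.eraseIdx n := by
      simp [popStep, PySem.List.pop?_natCast xs n hn]
    have h2 : popStep (x :: xs) ((n : Int) + 1) = x :: xs.eraseIdx n := by
      have hn' : n + 1 < (x :: xs).length := by simp; omega
      have hcast : ((n : Int) + 1) = ((n + 1 : Nat) : Int) := by push_cast; ring
      rw [hcast]
      unfold popStep
      rw [PySem.List.pop?_natCast (x :: xs) (n + 1) hn']
      simp
    rw [h1, h2]
    apply ih
    · exact hpw.of_cons
    · intro j hj
      have hji : j < (n : Int) := List.rel_of_pairwise_cons hpw hj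
      have h0j := (hb j (by simp [hj])).1
      have hlen : (xs.eraseIdx n).length = xs.length - 1 := List.length_eraseIdx_of_lt hn
      refine ⟨h0j, ?_⟩
      rw [hlen]
      omega

-- the inner two loops of A (one prefix k) act as a single filter
lemma pass_eq_filter {α : Type} (q : α → Bool) (xs : List α) :
    (omitF q 0 xs).reverse.foldl popStep xs = xs.filter (fun f => !q f) := by
  induction xs with
  | nil => simp [omitF]
  | cons x xs ih =>
    have hrw : omitF q 0 (x :: xs) = (if q x then [(0 : Int)] else []) ++ (omitF q 0 xs).map (· + 1) := by
      simp only [omitF, omitF_shift]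
    rw [hrw, List.reverse_append, List.foldl_append, ← List.map_reverse]
    rw [popStep_shift x xs _ ((List.pairwise_reverse).2 (omitF_pairwise q xs 0))
      (by
        intro i hi
        have := omitF_bounds q xs 0 i (List.mem_reverse.1 hi)
        exact ⟨this.1, by omega⟩)]
    rw [ih]
    by_cases h : q x
    · simp [h, popStep, PySem.List.pop?_zero_cons]
    · simp [h]

-- folding per-prefix filters equals one filter with `any`
lemma foldl_filter {α : Type} (p : String → α → Bool) (tr : List String) (s : List α) :
    tr.foldl (fun s k => s.filter (fun f => !p k f)) s
      = if tr.isEmpty then s else s.filter (fun f => !(tr.any (fun k => p k f))) := by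
  induction tr generalizing s with
  | nil => simp
  | cons k tr ih =>
    rw [List.foldl_cons, ih]
    by_cases h : tr.isEmpty
    · have : tr = [] := List.isEmpty_iff.1 h
      subst this
      simp
    · rw [if_neg h, if_neg (by simp)]
      rw [List.filter_filter]
      congr 1
      funext f
      by_cases h1 : p k f <;> simp [h1]

-- A's port, rewritten: each prefix pass is the omitF/popStep pipeline
lemma filterA_eq (schema : List (List (String × List (String × String)))) (to_remove : List String) :
    filter_schema schema to_remove
      = to_remove.foldl (fun s k =>
          (omitF (fun f => PySem.Str.startswith (pvName f) k) 0 s).reverse.foldl popStep s) schema := by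
  unfold filter_schema
  congr 1
  funext s k
  show ((PySem.List.enumerate s).foldl
      (fun acc p => if PySem.Str.startswith (pvName p.2) k then acc ++ [p.1] else acc) []).reverse.foldl
      (fun s2 idx => match PySem.List.pop? s2 idx with | some r => r.2 | none => s2) s
    = (omitF (fun f => PySem.Str.startswith (pvName f) k) 0 s).reverse.foldl popStep s
  have h := omitF_foldl (fun f => PySem.Str.startswith (pvName f) k) s 0 []
  rw [List.nil_append] at h
  rw [h]
  have hfn : (fun (s2 : List (List (String × List (String × String)))) (idx : Int) =>
      match PySem.List.pop? s2 idx with | some r => r.2 | none => s2) = popStep := by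
    funext s2 idx
    cases h : PySem.List.pop? s2 idx <;> simp [popStep, h]
  rw [hfn]

-- ===== VERDICT (by name: the statement is the Claim_ definition above) =====
theorem filter_schema_spec : Claim_equal_filter_schema := by
  intro schema to_remove _ _
  show filter_schema schema to_remove = filter_schema_alt schema to_remove
  rw [filterA_eq]
  have hpass : ∀ (s : List (List (String × List (String × String)))) (k : String),
      (omitF (fun f => PySem.Str.startswith (pvName f) k) 0 s).reverse.foldl popStep s
        = s.filter (fun f => !(PySem.Str.startswith (pvName f) k)) :=
    fun s k => pass_eq_filter _ s
  calc to_remove.foldl (fun s k =>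
          (omitF (fun f => PySem.Str.startswith (pvName f) k) 0 s).reverse.foldl popStep s) schema
      = to_remove.foldl (fun s k => s.filter (fun f => !(PySem.Str.startswith (pvName f) k))) schema := by
        clear hpass
        simp only [pass_eq_filter]
    _ = filter_schema_alt schema to_remove := by
        rw [foldl_filter (fun k f => PySem.Str.startswith (pvName f) k)]
        unfold filter_schema_alt
        rfl
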